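-- pv_equiv track=rewrite | github.com/vitorh333/Provas-ICPC | Brazil/SUBREG/2013/d.py | backtrack
-- ===== SOURCE A (Python) =====
-- def backtrack(pos, aux, usados):
--     if pos == len(aux):
--         return True
--
--
--
--     for s in aux[pos]:
--         if usados.isdisjoint(s):
--             if backtrack(pos + 1, aux, usados | s):
--                 return True
--
--     return False
-- ===== SOURCE B (Python) =====
-- def backtrack(pos, aux, usados):
--     stack = [(pos, usados)]
--     while stack:
--         p, u = stack.pop()
--         if p == len(aux):
--             return True
--         for s in aux[p]:
--             if u.isdisjoint(s):
--                 stack.append((p + 1, u | s))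
--     return False
-- ===== Notes on version B (the rewrite author's own statement) =====
-- stated objective: alternative
-- what changed: The recursive backtracking search is replaced by an iterative depth-first search over an explicit stack of (position, used-set) frontier states; the boolean feasibility result is order-independent, so both explore the same state space.
import Mathlib
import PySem

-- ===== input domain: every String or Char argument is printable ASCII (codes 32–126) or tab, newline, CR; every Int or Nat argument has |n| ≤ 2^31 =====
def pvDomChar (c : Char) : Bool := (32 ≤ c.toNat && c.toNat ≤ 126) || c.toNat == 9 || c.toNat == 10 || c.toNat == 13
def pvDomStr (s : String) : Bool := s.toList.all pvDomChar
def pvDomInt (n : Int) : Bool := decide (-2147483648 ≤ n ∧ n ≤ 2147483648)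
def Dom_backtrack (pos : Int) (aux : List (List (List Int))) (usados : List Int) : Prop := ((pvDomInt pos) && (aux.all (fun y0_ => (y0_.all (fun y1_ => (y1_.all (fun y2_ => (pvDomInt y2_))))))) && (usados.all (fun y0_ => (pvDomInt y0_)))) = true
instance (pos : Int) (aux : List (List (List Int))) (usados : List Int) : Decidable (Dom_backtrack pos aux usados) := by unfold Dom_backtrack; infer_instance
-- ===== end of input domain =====

-- B replaces A's recursive backtracking by an iterative DFS over an explicit stack of (position, used-set) states; same boolean result (alternative decomposition, no speed claim).


-- ===== PORT A =====
-- Literal port of A's recursive backtracking; aux[pos] is PySem.List.pyGet? (none = IndexError,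
-- reachable only outside Pre_backtrack, where the port returns false instead of raising).
def backtrack (pos : Int) (aux : List (List (List Int))) (usados : List Int) : Bool :=
  if pos = (aux.length : Int) then true
  else
    match h : PySem.List.pyGet? aux pos with
    | none => false   -- Python raises IndexError here; outside Pre_backtrack
    | some row =>
      -- 'for s in aux[pos]: if usados.isdisjoint(s): if backtrack(...): return True' / 'return False'
      row.attach.any (fun s =>
        PySem.Set.isdisjoint usados s.1 && backtrack (pos + 1) aux (PySem.Set.union usados s.1))
termination_by (aux.length + 1 - pos).toNat
decreasing_by
  have hne : ¬ (PySem.List.pyGet? aux pos = none) := by simp [h]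
  rw [PySem.List.pyGet?_eq_none_iff] at hne
  simp [PySem.Raise.InRange] at hne
  omega

-- ===== PORT B =====
-- B-side helpers: pushStep is the body of Source B's inner 'for s in aux[p]' loop (push each
-- admissible child state); backtrackLoop is the 'while stack' loop.  The Lean list head is the
-- Python list tail = top of stack: children are pushed in row order, hence popped
-- last-pushed-first, exactly as Source B's stack.pop().
-- pvM / pvStackMeasure / the pv*-lemmas below them are proof-side only (termination measure).
def pushStep (p : Int) (u : List Int) (st : List (Int × List Int)) (s : List Int) :
    List (Int × List Int) :=
  if PySem.Set.isdisjoint u s then (p + 1, PySem.Set.union u s) :: st else st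

def pvM (aux : List (List (List Int))) : Nat := (aux.map List.length).sum + 2

def pvStackMeasure (aux : List (List (List Int))) : List (Int × List Int) → Nat
  | [] => 0
  | (p, _) :: rest => pvM aux ^ ((aux.length + 1 - p).toNat) + pvStackMeasure aux rest

theorem pvLen_le_sum (aux : List (List (List Int))) (row : List (List Int)) (hrow : row ∈ aux) :
    row.length ≤ (aux.map List.length).sum := by
  induction aux with
  | nil => cases hrow
  | cons r rs ih =>
    rw [List.mem_cons] at hrow
    rcases hrow with h | h
    · subst h; simp
    · have := ih h; simp; omega

theorem pvMeasure_foldl_le (aux : List (List (List Int))) (p : Int) (u : List Int)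
    (row : List (List Int)) (rest : List (Int × List Int)) :
    pvStackMeasure aux (row.foldl (pushStep p u) rest)
      ≤ pvStackMeasure aux rest + row.length * pvM aux ^ ((aux.length + 1 - (p + 1)).toNat) := by
  induction row generalizing rest with
  | nil => simp
  | cons s rs ih =>
    simp only [List.foldl_cons, List.length_cons]
    calc pvStackMeasure aux (rs.foldl (pushStep p u) (pushStep p u rest s))
        ≤ pvStackMeasure aux (pushStep p u rest s)
            + rs.length * pvM aux ^ ((aux.length + 1 - (p + 1)).toNat) := ih _
      _ ≤ (pvStackMeasure aux rest + pvM aux ^ ((aux.length + 1 - (p + 1)).toNat))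
            + rs.length * pvM aux ^ ((aux.length + 1 - (p + 1)).toNat) := by
            unfold pushStep; split
            · simp [pvStackMeasure]; omega
            · omega
      _ ≤ pvStackMeasure aux rest + (rs.length + 1) * pvM aux ^ ((aux.length + 1 - (p + 1)).toNat) := by
            ring_nf; omega

def backtrackLoop (aux : List (List (List Int))) (stack : List (Int × List Int)) : Bool :=
  match stack with
  | [] => false                                   -- 'while stack: … return False'
  | (p, u) :: rest =>                             -- 'p, u = stack.pop()'
    if p = (aux.length : Int) then true
    else
      match h : PySem.List.pyGet? aux p with
      | none => backtrackLoop aux rest            -- Python raises IndexError here; outside Pre_backtrack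
      | some row =>
        backtrackLoop aux (row.foldl (pushStep p u) rest)
termination_by pvStackMeasure aux stack
decreasing_by
  · have hpos : 0 < pvM aux ^ ((aux.length + 1 - p).toNat) :=
      pow_pos (by simp [pvM]) _
    simp [pvStackMeasure]; omega
  · -- popped weight pvM^e strictly dominates the total weight of the pushed children
    have hne : ¬ (PySem.List.pyGet? aux p = none) := by simp [h]
    rw [PySem.List.pyGet?_eq_none_iff] at hne
    simp [PySem.Raise.InRange] at hne
    have hrow : row ∈ aux := PySem.List.mem_of_pyGet?_eq_some aux h
    have hlen : row.length ≤ pvM aux - 2 := by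
      have := pvLen_le_sum aux row hrow
      simp [pvM]; omega
    have hM : 2 ≤ pvM aux := by simp [pvM]
    have hexp : (aux.length + 1 - p).toNat = (aux.length + 1 - (p + 1)).toNat + 1 := by omega
    have hpow : 0 < pvM aux ^ ((aux.length + 1 - (p + 1)).toNat) := pow_pos (by omega) _
    calc pvStackMeasure aux (row.foldl (pushStep p u) rest)
        ≤ pvStackMeasure aux rest + row.length * pvM aux ^ ((aux.length + 1 - (p + 1)).toNat) :=
          pvMeasure_foldl_le aux p u row rest
      _ < pvStackMeasure aux rest + pvM aux ^ ((aux.length + 1 - p).toNat) := by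
          rw [hexp, pow_succ]
          have hlt : row.length * pvM aux ^ ((aux.length + 1 - (p + 1)).toNat)
              < pvM aux ^ ((aux.length + 1 - (p + 1)).toNat) * pvM aux := by
            rw [mul_comm (pvM aux ^ _) (pvM aux)]
            exact Nat.mul_lt_mul_of_lt_of_le (by omega) (le_refl _) hpow
          omega
      _ = pvM aux ^ ((aux.length + 1 - p).toNat) + pvStackMeasure aux rest := by omega
      _ = pvStackMeasure aux ((p, u) :: rest) := rfl

def backtrack_alt (pos : Int) (aux : List (List (List Int))) (usados : List Int) : Bool :=
  backtrackLoop aux [(pos, usados)]               -- 'stack = [(pos, usados)]'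

-- ===== PRECONDITION & SPEC =====
-- Pre_ excludes exactly the inputs where Python's aux[pos] / aux[p] raises IndexError
-- (pos out of range and not equal to len(aux)); both A and B raise there.
def Pre_backtrack (pos : Int) (aux : List (List (List Int))) (usados : List Int) : Prop :=
  -(aux.length : Int) ≤ pos ∧ pos ≤ (aux.length : Int)
instance (pos : Int) (aux : List (List (List Int))) (usados : List Int) : Decidable (Pre_backtrack pos aux usados) := by unfold Pre_backtrack; infer_instance
def pvWitness_backtrack : Int × List (List (List Int)) × List Int := (0, [[[1], [2]], [[2], [3]]], [3])
def Spec_backtrack (pos : Int) (aux : List (List (List Int))) (usados : List Int) (out : Bool) : Prop := out = backtrack_alt pos aux usados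
instance (pos : Int) (aux : List (List (List Int))) (usados : List Int) (out : Bool) : Decidable (Spec_backtrack pos aux usados out) := by unfold Spec_backtrack; infer_instance

-- ===== CLAIM (what is proved, stated in full; the proofs are below) =====
def Claim_equal_backtrack : Prop := ∀ (pos : Int) (aux : List (List (List Int))) (usados : List Int), Dom_backtrack pos aux usados → Pre_backtrack pos aux usados → Spec_backtrack pos aux usados (backtrack pos aux usados)

-- ===== LEMMAS AND PROOFS =====

-- characterisations of one step of A's recursion
theorem backtrack_of_none (p : Int) (aux : List (List (List Int))) (u : List Int)
    (hp : ¬ p = (aux.length : Int)) (h : PySem.List.pyGet? aux p = none) :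
    backtrack p aux u = false := by
  rw [backtrack.eq_def]
  simp only [hp, if_false]
  split <;> simp_all

theorem backtrack_of_some (p : Int) (aux : List (List (List Int))) (u : List Int)
    (row : List (List Int)) (hp : ¬ p = (aux.length : Int))
    (h : PySem.List.pyGet? aux p = some row) :
    backtrack p aux u
      = row.any (fun s => PySem.Set.isdisjoint u s && backtrack (p + 1) aux (PySem.Set.union u s)) := by
  rw [backtrack.eq_def]
  simp only [hp, if_false]
  split <;> simp_all

-- any-of-stack distributes over the child-pushing fold
theorem any_foldl_pushStep (aux : List (List (List Int))) (p : Int) (u : List Int)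
    (row : List (List Int)) (rest : List (Int × List Int)) :
    (row.foldl (pushStep p u) rest).any (fun e => backtrack e.1 aux e.2)
      = (row.any (fun s => PySem.Set.isdisjoint u s && backtrack (p + 1) aux (PySem.Set.union u s))
          || rest.any (fun e => backtrack e.1 aux e.2)) := by
  induction row generalizing rest with
  | nil => simp
  | cons s rs ihr =>
    simp only [List.foldl_cons, List.any_cons]
    by_cases hd : PySem.Set.isdisjoint u s
    · have hps : pushStep p u rest s = (p + 1, PySem.Set.union u s) :: rest := by
        simp [pushStep, hd]
      rw [hps, ihr, List.any_cons]
      simp [hd, Bool.or_left_comm, Bool.or_assoc]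
    · have hps : pushStep p u rest s = rest := by
        simp [pushStep, hd]
      rw [hps, ihr]
      simp [hd]

-- the stack loop computes "some state on the stack succeeds under A's recursion"
theorem backtrackLoop_eq_any (aux : List (List (List Int))) (stack : List (Int × List Int)) :
    backtrackLoop aux stack = stack.any (fun e => backtrack e.1 aux e.2) := by
  fun_induction backtrackLoop aux stack
  case case1 => simp
  case case2 u rest =>
    have : backtrack (aux.length : Int) aux u = true := by
      rw [backtrack.eq_def]; simp
    simp [List.any_cons, this]
  case case3 p u rest hp h ih =>
    rw [ih]
    simp [List.any_cons, backtrack_of_none p aux u hp h]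
  case case4 p u rest hp row h ih =>
    rw [ih, any_foldl_pushStep, List.any_cons, backtrack_of_some p aux u row hp h]

-- ===== VERDICT (by name: the statement is the Claim_ definition above) =====
theorem backtrack_spec : Claim_equal_backtrack := by
  intro pos aux usados _ _
  unfold Spec_backtrack backtrack_alt
  rw [backtrackLoop_eq_any]
  simp
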